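-- pv_equiv track=rewrite | github.com/19990818/leetcode-python | 2023-4/2023-4-19.py | findPrefixScore
-- ===== SOURCE A (Python) =====
-- from typing import List
--
-- def findPrefixScore(nums: List[int]) -> List[int]:
--     ma=0
--     for i in range(0,len(nums)):
--         ma=max(ma,nums[i])
--         nums[i]+=ma
--     res=[0 for _ in range(0,len(nums))]
--     res[0]=nums[0]
--     for i in range(1,len(nums)):
--         res[i]=res[i-1]+nums[i]
--     return res
-- ===== SOURCE B (Python) =====
-- from typing import List
--
-- def findPrefixScore(nums: List[int]) -> List[int]:
--     # Pure per-index closed form: res[i] = sum(nums[:i+1]) + sum of clamped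
--     # prefix maxima; no running state, no mutation of nums.
--     # (Return value only: unlike A, this does not mutate nums in place.)
--     n = len(nums)
--     pm = [max(0, max(nums[: j + 1])) for j in range(n)]
--     return [sum(nums[: i + 1]) + sum(pm[: i + 1]) for i in range(n)]
-- ===== Notes on version B (the rewrite author's own statement) =====
-- stated objective: alternative
-- what changed: A is a stateful two-pass loop that mutates nums in place with a running max and then takes running prefix sums; B is a pure per-index closed form built from slices, res[i] = sum(nums[:i+1]) + sum(max(0, max(nums[:j+1])) for j <= i), with no accumulator and no mutation (quadratic, traded for clarity).
import Mathlib
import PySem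

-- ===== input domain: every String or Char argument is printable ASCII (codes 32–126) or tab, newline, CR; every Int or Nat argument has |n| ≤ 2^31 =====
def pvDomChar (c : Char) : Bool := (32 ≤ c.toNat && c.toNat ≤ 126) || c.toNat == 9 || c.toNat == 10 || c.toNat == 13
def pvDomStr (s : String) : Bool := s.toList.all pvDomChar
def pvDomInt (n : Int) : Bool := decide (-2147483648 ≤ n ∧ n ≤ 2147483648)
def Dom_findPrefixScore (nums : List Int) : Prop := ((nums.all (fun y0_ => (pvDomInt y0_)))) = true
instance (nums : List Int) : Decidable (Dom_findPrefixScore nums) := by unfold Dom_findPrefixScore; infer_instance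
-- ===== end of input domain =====

-- B replaces A's stateful two-pass loop by a pure per-index closed form over slices;
-- equivalence is about the RETURN value only: A also mutates nums in place, B does not.


-- ===== PORT A =====
-- first loop: ma = max(ma, nums[i]); nums[i] += ma
def pvPass1 : List Int → Int → List Int
  | [], _ => []
  | x :: xs, ma =>
    let ma' := max ma x
    (x + ma') :: pvPass1 xs ma'

-- second loop: res[i] = res[i-1] + nums[i]
def pvScan : List Int → Int → List Int
  | [], _ => []
  | x :: xs, prev => (prev + x) :: pvScan xs (prev + x)

def findPrefixScore (nums : List Int) : List Int :=
  match pvPass1 nums 0 with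
  | [] => []            -- Python raises IndexError here (empty list); excluded by Pre_
  | x :: xs => x :: pvScan xs x

-- ===== PORT B =====
-- Python max(l): raises on []; here only applied to nonempty slices nums[:j+1], j < len(nums)
def pyMax1 : List Int → Int
  | [] => 0             -- unreachable on B's call sites (slices are nonempty)
  | x :: t => t.foldl max x

-- Python sum(l)
def pySum (l : List Int) : Int := l.foldl (· + ·) 0

-- nums[:k] with k ≥ 1 is exactly List.take k
def findPrefixScore_alt (nums : List Int) : List Int :=
  let n := nums.length
  let pm := (List.range n).map (fun j => max 0 (pyMax1 (nums.take (j + 1))))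
  (List.range n).map (fun i => pySum (nums.take (i + 1)) + pySum (pm.take (i + 1)))

-- ===== PRECONDITION & SPEC =====
-- Pre_ excludes only the empty list, on which A raises IndexError (it reads the first element).
def Pre_findPrefixScore (nums : List Int) : Prop := nums ≠ []
instance (nums : List Int) : Decidable (Pre_findPrefixScore nums) := by unfold Pre_findPrefixScore; infer_instance
def pvWitness_findPrefixScore : List Int := [2, -1, 3]

def Spec_findPrefixScore (nums : List Int) (out : List Int) : Prop := out = findPrefixScore_alt nums
instance (nums : List Int) (out : List Int) : Decidable (Spec_findPrefixScore nums out) := by unfold Spec_findPrefixScore; infer_instance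

-- ===== CLAIM (what is proved, stated in full; the proofs are below) =====
def Claim_equal_findPrefixScore : Prop := ∀ (nums : List Int), Dom_findPrefixScore nums → Pre_findPrefixScore nums → Spec_findPrefixScore nums (findPrefixScore nums)

-- ===== LEMMAS AND PROOFS =====
theorem foldl_max_init (t : List Int) : ∀ a x : Int, t.foldl max (max a x) = max a (t.foldl max x) := by
  induction t with
  | nil => intro a x; rfl
  | cons y t ih =>
    intro a x
    simp only [List.foldl_cons, max_assoc, ih]

theorem foldl_add_init (t : List Int) : ∀ a : Int, t.foldl (· + ·) a = a + t.foldl (· + ·) 0 := by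
  induction t with
  | nil => intro a; simp
  | cons y t ih =>
    intro a
    simp only [List.foldl_cons]
    rw [ih (a + y), ih (0 + y)]
    ring

theorem pySum_cons (x : Int) (l : List Int) : pySum (x :: l) = x + pySum l := by
  simp [pySum, List.foldl_cons]
  rw [foldl_add_init l x]

theorem pySum_zip (as : List Int) : ∀ bs : List Int, as.length = bs.length →
    pySum (List.zipWith (· + ·) as bs) = pySum as + pySum bs := by
  induction as with
  | nil => intro bs h; cases bs <;> simp_all [pySum]
  | cons a as ih =>
    intro bs h
    cases bs with
    | nil => simp at h
    | cons b bs =>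
      simp only [List.zipWith_cons_cons, pySum_cons]
      rw [ih bs (by simpa using h)]
      ring

-- A's first loop is pointwise: pvPass1 xs ma adds foldl max ma over the prefix to each element
theorem pass1_zip (xs : List Int) : ∀ ma : Int,
    pvPass1 xs ma = List.zipWith (· + ·) xs
      ((List.range xs.length).map (fun j => (xs.take (j + 1)).foldl max ma)) := by
  induction xs with
  | nil => intro ma; rfl
  | cons x xs ih =>
    intro ma
    simp only [pvPass1, List.length_cons, List.range_succ_eq_map, List.map_cons,
      List.map_map, List.zipWith_cons_cons, List.cons.injEq]
    refine ⟨?_, ?_⟩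
    · simp
    · rw [ih (max ma x)]
      congr 1

-- prefix sums over range = pvScan
theorem scan_range (xs : List Int) : ∀ c : Int,
    (List.range xs.length).map (fun i => c + pySum (xs.take (i + 1))) = pvScan xs c := by
  induction xs with
  | nil => intro c; rfl
  | cons x xs ih =>
    intro c
    simp only [List.length_cons, List.range_succ_eq_map, List.map_cons, List.map_map, pvScan,
      List.cons.injEq]
    refine ⟨?_, ?_⟩
    · simp [pySum]
    · rw [← ih (c + x)]
      apply List.map_congr_left
      intro j _
      simp [pySum_cons]
      ring

theorem pyMax1_bridge (xs : List Int) (j : Nat) (hj : j < xs.length) :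
    max 0 (pyMax1 (xs.take (j + 1))) = (xs.take (j + 1)).foldl max 0 := by
  have hne : xs.take (j + 1) ≠ [] := by
    cases xs with
    | nil => simp at hj
    | cons x t => simp [List.take]
  cases h : xs.take (j + 1) with
  | nil => exact absurd h hne
  | cons y t =>
    simp only [pyMax1, List.foldl_cons]
    rw [foldl_max_init t 0 y]

-- ===== VERDICT (by name: the statement is the Claim_ definition above) =====
theorem findPrefixScore_spec : Claim_equal_findPrefixScore := by
  intro nums _ hpre
  unfold Spec_findPrefixScore
  unfold findPrefixScore_alt
  simp only []
  set n := nums.length with hn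
  -- bridge the prefix-max list to foldl form
  have hpm : (List.range n).map (fun j => max 0 (pyMax1 (nums.take (j + 1))))
      = (List.range n).map (fun j => (nums.take (j + 1)).foldl max 0) := by
    apply List.map_congr_left
    intro j hj
    exact pyMax1_bridge nums j (by simpa [hn] using List.mem_range.mp hj)
  rw [hpm]
  set pm := (List.range n).map (fun j => (nums.take (j + 1)).foldl max 0) with hpmdef
  have hlen : pm.length = n := by simp [hpmdef]
  -- sums of takes combine into sums of takes of the zip
  have hzip : ∀ i : Nat, pySum (nums.take (i + 1)) + pySum (pm.take (i + 1))
      = 0 + pySum ((List.zipWith (· + ·) nums pm).take (i + 1)) := by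
    intro i
    rw [List.take_zipWith, pySum_zip]
    · ring
    · simp [hlen, hn]
  have h1 : (List.range n).map (fun i => pySum (nums.take (i + 1)) + pySum (pm.take (i + 1)))
      = (List.range n).map (fun i => 0 + pySum ((List.zipWith (· + ·) nums pm).take (i + 1))) := by
    apply List.map_congr_left; intro i _; exact hzip i
  rw [h1]
  have hzlen : (List.zipWith (· + ·) nums pm).length = n := by simp [hlen, hn]
  rw [← hzlen, scan_range]
  have hp1 : pvPass1 nums 0 = List.zipWith (· + ·) nums pm := by
    rw [hpmdef, hn]; exact pass1_zip nums 0
  rw [← hp1]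
  -- finally: findPrefixScore nums = pvScan (pvPass1 nums 0) 0 for nonempty nums
  cases nums with
  | nil => exact absurd rfl hpre
  | cons x xs =>
    simp [findPrefixScore, pvPass1, pvScan]
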